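-- pv_equiv track=rewrite | github.com/roholazandie/wikipedia_to_mongodb | utils.py | remove_template
-- ===== SOURCE A (Python) =====
-- def remove_template(s):
--     """Remove template wikimedia markup.
--
--     Parameters
--     ----------
--     s : str
--         String containing markup template.
--
--     Returns
--     -------
--     str
--         Сopy of `s` with all the `wikimedia markup template <http://meta.wikimedia.org/wiki/Help:Template>`_ removed.
--
--     Notes
--     -----
--     Since template can be nested, it is difficult remove them using regular expressions.
--
--     """
--     # Find the start and end position of each template by finding the opening
--     # '{{' and closing '}}'
--     n_open, n_close = 0, 0
--     starts, ends = [], [-1]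
--     in_template = False
--     prev_c = None
--     for i, c in enumerate(s):
--         if not in_template:
--             if c == '{' and c == prev_c:
--                 starts.append(i - 1)
--                 in_template = True
--                 n_open = 1
--         if in_template:
--             if c == '{':
--                 n_open += 1
--             elif c == '}':
--                 n_close += 1
--             if n_open == n_close:
--                 ends.append(i)
--                 in_template = False
--                 n_open, n_close = 0, 0
--         prev_c = c
--
--     # Remove all the templates
--     starts.append(None)
--     return ''.join(s[end + 1:start] for end, start in zip(ends, starts))
-- ===== SOURCE B (Python) =====
-- def remove_template(s):
--     """Remove template wikimedia markup: single pass with a brace-depth counter."""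
--     result = []
--     depth = 0
--     prev = None
--     for c in s:
--         if depth == 0:
--             if c == '{' and prev == '{':
--                 # the first '{' of the opening pair was already emitted: drop it
--                 result = result[:-1]
--                 depth = 2
--             else:
--                 result.append(c)
--         else:
--             if c == '{':
--                 depth += 1
--             elif c == '}':
--                 depth -= 1
--         prev = c
--     return ''.join(result)
-- ===== Notes on version B (the rewrite author's own statement) =====
-- stated objective: simpler
-- what changed: Replaces A's two-phase scheme (record template start/end boundary indices in lists, then zip them and join string slices) with a single pass that keeps one brace-depth counter and appends kept characters directly to the output buffer.
import Mathlib
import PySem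

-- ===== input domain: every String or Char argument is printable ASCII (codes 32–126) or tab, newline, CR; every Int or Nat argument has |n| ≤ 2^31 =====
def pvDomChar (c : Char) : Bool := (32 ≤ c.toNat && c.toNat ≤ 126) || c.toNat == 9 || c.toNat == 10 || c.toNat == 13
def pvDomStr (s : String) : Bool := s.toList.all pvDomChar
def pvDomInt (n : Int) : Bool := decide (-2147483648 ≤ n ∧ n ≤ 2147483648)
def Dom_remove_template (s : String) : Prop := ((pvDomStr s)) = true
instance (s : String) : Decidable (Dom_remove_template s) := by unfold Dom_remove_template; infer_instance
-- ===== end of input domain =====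

-- B replaces A's boundary-index bookkeeping (start/end lists + zip/slice join) by a single
-- pass that keeps a brace-depth counter and builds the output buffer directly (objective: simpler).

-- ===== PORT A =====
structure RTStateA where
  nOpen : Int
  nClose : Int
  starts : List Int
  ends : List Int
  inTemplate : Bool
  prev : Option Char
deriving Repr, DecidableEq

def rtInitA : RTStateA := ⟨0, 0, [], [-1], false, none⟩

def rtStepA (st : RTStateA) (ic : Int × Char) : RTStateA :=
  let i := ic.1
  let c := ic.2
  -- `if not in_template: if c == '{' and c == prev_c: …`
  let st1 :=
    if (!st.inTemplate) ∧ c = '{' ∧ st.prev = some c then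
      { st with starts := st.starts ++ [i - 1], inTemplate := true, nOpen := 1 }
    else st
  -- `if in_template: …`
  let st2 :=
    if st1.inTemplate then
      let no := if c = '{' then st1.nOpen + 1 else st1.nOpen
      let nc := if c = '}' then st1.nClose + 1 else st1.nClose
      if no = nc then
        { st1 with ends := st1.ends ++ [i], inTemplate := false, nOpen := 0, nClose := 0 }
      else
        { st1 with nOpen := no, nClose := nc }
    else st1
  { st2 with prev := some c }

def remove_template (s : String) : String :=
  let l := s.toList
  let st := (PySem.List.enumerate l).foldl rtStepA rtInitA
  -- `starts.append(None); ''.join(s[end + 1:start] for end, start in zip(ends, starts))`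
  let startsO : List (Option Int) := st.starts.map some ++ [none]
  String.mk (PySem.Chars.join []
    ((st.ends.zip startsO).map fun es => PySem.List.slice l (some (es.1 + 1)) es.2))

-- ===== PORT B =====
structure RTStateB where
  out : List Char
  depth : Int
  prev : Option Char
deriving Repr, DecidableEq

def rtInitB : RTStateB := ⟨[], 0, none⟩

def rtStepB (st : RTStateB) (c : Char) : RTStateB :=
  if st.depth = 0 then
    if c = '{' ∧ st.prev = some '{' then
      { out := PySem.List.slice st.out none (some (-1)), depth := 2, prev := some c }
    else
      { out := st.out ++ [c], depth := 0, prev := some c }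
  else
    let d := if c = '{' then st.depth + 1 else if c = '}' then st.depth - 1 else st.depth
    { st with depth := d, prev := some c }

def remove_template_alt (s : String) : String :=
  String.mk ((s.toList.foldl rtStepB rtInitB).out)

-- ===== PRECONDITION & SPEC =====
def Spec_remove_template (s : String) (out : String) : Prop := out = remove_template_alt s
instance (s : String) (out : String) : Decidable (Spec_remove_template s out) := by unfold Spec_remove_template; infer_instance

-- ===== CLAIM (what is proved, stated in full; the proofs are below) =====
def Claim_equal_remove_template : Prop := ∀ (s : String), Dom_remove_template s → Spec_remove_template s (remove_template s)

-- ===== LEMMAS AND PROOFS =====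

/-- The text A's final join contributes for the already-closed pairs `zip ends starts`. -/
def rtPieces (l : List Char) (ends starts : List Int) : List Char :=
  ((ends.zip starts).map fun es => PySem.List.slice l (some (es.1 + 1)) (some es.2)).flatten

lemma rt_join_nil (parts : List (List Char)) : PySem.Chars.join [] parts = parts.flatten := by
  simp only [PySem.Chars.join, List.intercalate]
  induction parts with
  | nil => rfl
  | cons x xs ih => cases xs <;> simp_all [List.intersperse]

lemma rt_zip_trunc {α β : Type} (xs zs : List α) (ys : List β) (h : ys.length ≤ xs.length) :
    (xs ++ zs).zip ys = xs.zip ys := by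
  induction xs generalizing ys with
  | nil => cases ys <;> simp_all
  | cons x xs ih => cases ys <;> simp_all

lemma rt_slice_stable (p : List Char) (c : Char) (e st : Int)
    (he : -1 ≤ e) (he' : e < (p.length : Int)) (hst : 0 ≤ st) (hst' : st ≤ (p.length : Int)) :
    PySem.List.slice (p ++ [c]) (some (e + 1)) (some st) =
      PySem.List.slice p (some (e + 1)) (some st) := by
  rw [PySem.List.slice_toNat _ (by omega) hst, PySem.List.slice_toNat _ (by omega) hst]
  rw [List.drop_append_of_le_length (by omega), List.take_append_of_le_length]
  simp only [List.length_drop]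
  omega

lemma rt_pieces_stable (p : List Char) (c : Char) (ends starts : List Int)
    (hE : ∀ e ∈ ends, -1 ≤ e ∧ e < (p.length : Int))
    (hS : ∀ t ∈ starts, 0 ≤ t ∧ t ≤ (p.length : Int)) :
    rtPieces (p ++ [c]) ends starts = rtPieces p ends starts := by
  unfold rtPieces
  congr 1
  apply List.map_congr_left
  intro es hes
  obtain ⟨h1, h2⟩ := List.of_mem_zip hes
  exact rt_slice_stable p c es.1 es.2 (hE _ h1).1 (hE _ h1).2 (hS _ h2).1 (hS _ h2).2

lemma rt_pieces_trunc (l : List Char) (rest : List Int) (e : Int) (starts : List Int)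
    (h : starts.length ≤ rest.length) :
    rtPieces l (rest ++ [e]) starts = rtPieces l rest starts := by
  unfold rtPieces
  rw [rt_zip_trunc _ _ _ h]

lemma rt_zip_trunc_right {α β : Type} (xs : List α) (ys zs : List β) (h : xs.length ≤ ys.length) :
    xs.zip (ys ++ zs) = xs.zip ys := by
  induction xs generalizing ys with
  | nil => simp
  | cons x xs ih => cases ys <;> simp_all

/-- Loop invariant relating A's state and B's state after processing the prefix `p`. -/
def rtInv (p : List Char) (a : RTStateA) (b : RTStateB) : Prop :=
  a.prev = p.getLast? ∧ b.prev = p.getLast? ∧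
  (∀ e ∈ a.ends, -1 ≤ e ∧ e < (p.length : Int)) ∧
  (∀ t ∈ a.starts, 0 ≤ t ∧ t ≤ (p.length : Int)) ∧
  (if a.inTemplate then
     a.starts.length = a.ends.length ∧
     b.depth = a.nOpen - a.nClose ∧ 0 < b.depth ∧
     b.out = rtPieces p a.ends a.starts
   else
     a.nOpen = 0 ∧ a.nClose = 0 ∧ b.depth = 0 ∧
     a.starts.length + 1 = a.ends.length ∧
     ∃ rest e, a.ends = rest ++ [e] ∧
       ((e + 1 = (p.length : Int)) → p = [] ∨ p.getLast? = some '}') ∧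
       b.out = rtPieces p a.ends a.starts ++ p.drop (e + 1).toNat)

lemma rt_step (p : List Char) (c : Char) (a : RTStateA) (b : RTStateB)
    (h : rtInv p a b) :
    rtInv (p ++ [c]) (rtStepA a ((p.length : Int), c)) (rtStepB b c) := by
  obtain ⟨no, nc, starts, ends, intpl, prevA⟩ := a
  obtain ⟨out, depth, prevB⟩ := b
  obtain ⟨hpa, hpb, hE, hS, hrest⟩ := h
  dsimp only at hpa hpb hE hS hrest
  have hlen' : ((p ++ [c]).length : Int) = (p.length : Int) + 1 := by simp
  have hE' : ∀ e ∈ ends, -1 ≤ e ∧ e < ((p ++ [c]).length : Int) := by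
    intro e he; have := hE e he; rw [hlen']; omega
  have hS' : ∀ t ∈ starts, 0 ≤ t ∧ t ≤ ((p ++ [c]).length : Int) := by
    intro t ht; have := hS t ht; rw [hlen']; omega
  cases intpl with
  | true =>
    rw [if_pos rfl] at hrest
    obtain ⟨hlen, hdep, hdpos, hout⟩ := hrest
    have hdneq : ¬ depth = 0 := by omega
    by_cases hc1 : c = '{'
    · -- stay in template, depth grows
      subst hc1
      have hnn : ¬ (no + 1 = nc) := by omega
      rw [show rtStepA ⟨no, nc, starts, ends, true, prevA⟩ ((p.length : Int), '{') =
            ⟨no + 1, nc, starts, ends, true, some '{'⟩ from by simp [rtStepA, hnn],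
        show rtStepB ⟨out, depth, prevB⟩ '{' = ⟨out, depth + 1, some '{'⟩ from by
          simp [rtStepB, hdneq]]
      refine ⟨List.getLast?_concat.symm, List.getLast?_concat.symm, hE', hS', ?_⟩
      rw [if_pos rfl]
      exact ⟨hlen, show depth + 1 = no + 1 - nc by omega,
        show (0 : Int) < depth + 1 by omega,
        show out = rtPieces (p ++ ['{']) ends starts from by
          rw [rt_pieces_stable p _ _ _ hE hS]; exact hout⟩
    · by_cases hc2 : c = '}'
      · subst hc2
        by_cases hclose : no = nc + 1
        · -- the template closes here
          rw [show rtStepA ⟨no, nc, starts, ends, true, prevA⟩ ((p.length : Int), '}') =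
                ⟨0, 0, starts, ends ++ [(p.length : Int)], false, some '}'⟩ from by
              simp [rtStepA, hclose],
            show rtStepB ⟨out, depth, prevB⟩ '}' = ⟨out, depth - 1, some '}'⟩ from by
              simp [rtStepB, hdneq]]
          refine ⟨List.getLast?_concat.symm, List.getLast?_concat.symm, ?_, hS', ?_⟩
          · intro e he
            rcases List.mem_append.mp he with h1 | h1
            · have := hE e h1; rw [hlen']; omega
            · simp at h1; subst h1; rw [hlen']
              exact ⟨by omega, by omega⟩
          · rw [if_neg (by simp)]
            refine ⟨rfl, rfl, show depth - 1 = 0 by omega,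
              show starts.length + 1 = (ends ++ [(p.length : Int)]).length from by
                simp [hlen],
              ends, (p.length : Int), rfl,
              fun _ => Or.inr List.getLast?_concat, ?_⟩
            show out = rtPieces (p ++ ['}']) (ends ++ [(p.length : Int)]) starts ++
              (p ++ ['}']).drop (((p.length : Int) + 1).toNat)
            rw [rt_pieces_trunc _ _ _ _ (by omega), rt_pieces_stable p _ _ _ hE hS,
              List.drop_eq_nil_of_le
                (by simp only [List.length_append, List.length_cons, List.length_nil]; omega),
              hout, List.append_nil]
        · -- depth decreases but stays positive
          rw [show rtStepA ⟨no, nc, starts, ends, true, prevA⟩ ((p.length : Int), '}') =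
                ⟨no, nc + 1, starts, ends, true, some '}'⟩ from by
              simp [rtStepA, hclose],
            show rtStepB ⟨out, depth, prevB⟩ '}' = ⟨out, depth - 1, some '}'⟩ from by
              simp [rtStepB, hdneq]]
          refine ⟨List.getLast?_concat.symm, List.getLast?_concat.symm, hE', hS', ?_⟩
          rw [if_pos rfl]
          exact ⟨hlen, show depth - 1 = no - (nc + 1) by omega,
            show (0 : Int) < depth - 1 by omega,
            show out = rtPieces (p ++ ['}']) ends starts from by
              rw [rt_pieces_stable p _ _ _ hE hS]; exact hout⟩
      · -- an ordinary character inside the template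
        have hnn : ¬ (no = nc) := by omega
        rw [show rtStepA ⟨no, nc, starts, ends, true, prevA⟩ ((p.length : Int), c) =
              ⟨no, nc, starts, ends, true, some c⟩ from by
            simp [rtStepA, hc1, hc2, hnn],
          show rtStepB ⟨out, depth, prevB⟩ c = ⟨out, depth, some c⟩ from by
            simp [rtStepB, hdneq, hc1, hc2]]
        refine ⟨List.getLast?_concat.symm, List.getLast?_concat.symm, hE', hS', ?_⟩
        rw [if_pos rfl]
        exact ⟨hlen, show depth = no - nc by omega, hdpos,
          show out = rtPieces (p ++ [c]) ends starts from by
            rw [rt_pieces_stable p _ _ _ hE hS]; exact hout⟩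
  | false =>
    rw [if_neg (by simp)] at hrest
    obtain ⟨hno, hnc, hd0, hlen, rest, e, hends, hcorner, hout⟩ := hrest
    subst hno hnc hd0 hends
    have heb : -1 ≤ e ∧ e < (p.length : Int) := hE e (by simp)
    have hrlen : rest.length = starts.length := by
      simp only [List.length_append, List.length_cons, List.length_nil] at hlen; omega
    by_cases hc1 : c = '{'
    · subst hc1
      by_cases hpv : p.getLast? = some '{'
      · -- a template opens: pop the speculatively emitted '{'
        have hpne : p ≠ [] := by intro h; rw [h] at hpv; simp at hpv
        have hcor : e + 1 < (p.length : Int) := by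
          rcases lt_or_eq_of_le (by omega : e + 1 ≤ (p.length : Int)) with h | h
          · exact h
          · rcases hcorner h with h' | h'
            · exact absurd h' hpne
            · rw [hpv] at h'; simp at h'
        have hdropne : p.drop (e + 1).toNat ≠ [] := by
          intro hnil
          have : p.length - (e + 1).toNat = 0 := by rw [← List.length_drop, hnil]; rfl
          omega
        rw [show rtStepA ⟨0, 0, starts, rest ++ [e], false, prevA⟩ ((p.length : Int), '{') =
              ⟨2, 0, starts ++ [(p.length : Int) - 1], rest ++ [e], true, some '{'⟩ from by
            simp [rtStepA, hpa, hpv],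
          show rtStepB ⟨out, 0, prevB⟩ '{' =
              ⟨PySem.List.slice out none (some (-1)), 2, some '{'⟩ from by
            simp [rtStepB, hpb, hpv]]
        refine ⟨List.getLast?_concat.symm, List.getLast?_concat.symm, hE', ?_, ?_⟩
        · intro t ht
          rcases List.mem_append.mp ht with h1 | h1
          · have := hS t h1; rw [hlen']; omega
          · simp at h1; subst h1; rw [hlen']
            exact ⟨by omega, by omega⟩
        · rw [if_pos rfl]
          refine ⟨show (starts ++ [(p.length : Int) - 1]).length = (rest ++ [e]).length from by
              simp [hrlen],
            show (2 : Int) = 2 - 0 by norm_num, show (0 : Int) < 2 by norm_num, ?_⟩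
          have key : rtPieces (p ++ ['{']) (rest ++ [e]) (starts ++ [(p.length : Int) - 1]) =
              rtPieces p (rest ++ [e]) starts ++ (p.drop (e + 1).toNat).dropLast := by
            rw [show rtPieces p (rest ++ [e]) starts = rtPieces p rest starts from
              rt_pieces_trunc _ _ _ _ (by omega)]
            unfold rtPieces
            rw [List.zip_append hrlen]
            simp only [List.zip_cons_cons, List.zip_nil_right,
              List.map_append, List.map_cons, List.map_nil, List.flatten_append,
              List.flatten_cons, List.flatten_nil, List.append_nil]
            congr 1
            · congr 1
              apply List.map_congr_left
              intro es hes
              obtain ⟨h1, h2⟩ := List.of_mem_zip hes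
              have hb1 := hE es.1 (by simp [h1])
              have hb2 := hS es.2 h2
              exact rt_slice_stable p _ es.1 es.2 hb1.1 hb1.2 hb2.1 hb2.2
            · rw [PySem.List.slice_toNat _ (by omega) (by omega),
                List.drop_append_of_le_length (by omega),
                List.take_append_of_le_length (by simp only [List.length_drop]; omega),
                List.dropLast_eq_take]
              congr 1
              simp only [List.length_drop]
              omega
          show PySem.List.slice out none (some (-1)) =
            rtPieces (p ++ ['{']) (rest ++ [e]) (starts ++ [(p.length : Int) - 1])
          rw [PySem.List.slice_to_neg_one, hout,
            List.dropLast_append_of_ne_nil hdropne, key]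
      · -- previous char is not '{': no template starts
        have hpvA : ¬ prevA = some '{' := by rw [hpa]; exact hpv
        have hpvB : ¬ prevB = some '{' := by rw [hpb]; exact hpv
        rw [show rtStepA ⟨0, 0, starts, rest ++ [e], false, prevA⟩ ((p.length : Int), '{') =
              ⟨0, 0, starts, rest ++ [e], false, some '{'⟩ from by
            simp [rtStepA, hpvA],
          show rtStepB ⟨out, 0, prevB⟩ '{' = ⟨out ++ ['{'], 0, some '{'⟩ from by
            simp [rtStepB, hpvB]]
        refine ⟨List.getLast?_concat.symm, List.getLast?_concat.symm, hE', hS', ?_⟩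
        rw [if_neg (by simp)]
        refine ⟨rfl, rfl, rfl, hlen, rest, e, rfl,
          (by rw [hlen']; intro h2; omega), ?_⟩
        show out ++ ['{'] = rtPieces (p ++ ['{']) (rest ++ [e]) starts ++
          (p ++ ['{']).drop ((e + 1).toNat)
        rw [rt_pieces_stable p _ _ _ hE hS, hout,
          List.drop_append_of_le_length (by omega), List.append_assoc]
    · -- an ordinary character outside any template
      have hne : ¬ (c = '{' ∧ prevA = some c) := by rintro ⟨h1, -⟩; exact hc1 h1
      have hneB : ¬ (c = '{' ∧ prevB = some '{') := by rintro ⟨h1, -⟩; exact hc1 h1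
      rw [show rtStepA ⟨0, 0, starts, rest ++ [e], false, prevA⟩ ((p.length : Int), c) =
            ⟨0, 0, starts, rest ++ [e], false, some c⟩ from by
          simp [rtStepA, hne],
        show rtStepB ⟨out, 0, prevB⟩ c = ⟨out ++ [c], 0, some c⟩ from by
          simp [rtStepB, hneB]]
      refine ⟨List.getLast?_concat.symm, List.getLast?_concat.symm, hE', hS', ?_⟩
      rw [if_neg (by simp)]
      refine ⟨rfl, rfl, rfl, hlen, rest, e, rfl,
        (by rw [hlen']; intro h2; omega), ?_⟩
      show out ++ [c] = rtPieces (p ++ [c]) (rest ++ [e]) starts ++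
        (p ++ [c]).drop ((e + 1).toNat)
      rw [rt_pieces_stable p _ _ _ hE hS, hout,
        List.drop_append_of_le_length (by omega), List.append_assoc]

lemma rt_main (p : List Char) :
    rtInv p ((PySem.List.enumerate p).foldl rtStepA rtInitA) (p.foldl rtStepB rtInitB) := by
  induction p using List.reverseRecOn with
  | nil =>
    refine ⟨rfl, rfl, ?_, ?_, ?_⟩
    · intro e he; simp [rtInitA] at he; omega
    · intro t ht; simp [rtInitA] at ht
    · rw [if_neg (by simp [rtInitA])]
      exact ⟨rfl, rfl, rfl, rfl, [], -1, rfl, fun _ => Or.inl rfl, rfl⟩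
  | append_singleton p c ih =>
    have he : PySem.List.enumerate (p ++ [c]) 0 =
        PySem.List.enumerate p 0 ++ [((p.length : Int), c)] := by
      rw [PySem.List.enumerate_append]
      simp [PySem.List.enumerate_cons, PySem.List.enumerate_nil]
    rw [he, List.foldl_append, List.foldl_append]
    exact rt_step p c _ _ ih

-- ===== VERDICT (by name: the statement is the Claim_ definition above) =====
theorem remove_template_spec : Claim_equal_remove_template := by
  intro s _
  unfold Spec_remove_template remove_template remove_template_alt
  dsimp only
  obtain ⟨-, -, hE, hS, hrest⟩ := rt_main s.toList
  set a := (PySem.List.enumerate s.toList).foldl rtStepA rtInitA with ha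
  set b := s.toList.foldl rtStepB rtInitB with hb
  by_cases hI : a.inTemplate = true
  · rw [if_pos hI] at hrest
    obtain ⟨hlen, -, -, hout⟩ := hrest
    rw [rt_join_nil, rt_zip_trunc_right _ _ _ (by simp [hlen]),
      List.zip_map_right, List.map_map, hout]
    unfold rtPieces
    congr 2
  · rw [if_neg hI] at hrest
    obtain ⟨-, -, -, hlen, rest, e, hends, -, hout⟩ := hrest
    have heb := hE e (by simp [hends])
    have hrlen : rest.length = a.starts.length := by
      have := congrArg List.length hends
      simp only [List.length_append, List.length_cons, List.length_nil] at this
      omega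
    rw [rt_join_nil, hends, List.zip_append (by simp [hrlen])]
    simp only [List.zip_cons_cons, List.zip_nil_right,
      List.map_append, List.map_cons, List.map_nil, List.flatten_append,
      List.flatten_cons, List.flatten_nil, List.append_nil]
    rw [PySem.List.slice_from _ (by omega), hout, hends,
      rt_pieces_trunc _ _ _ _ (by omega)]
    congr 1
    rw [List.zip_map_right, List.map_map]
    unfold rtPieces
    congr 1
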